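-- pv_equiv track=rewrite | github.com/mangrovex/OEN | custom/openedunav_report/controllers/report_base.py | get_scores_array_without_index
-- ===== SOURCE A (Python) =====
-- def get_scores_array_without_index(data, course_state=None, student_id=None):
--     if data:
--         extra_line = 2
--         num_students = len(data)
--         line_1 = 0
--         line_2 = 0
--         count = (num_students - 1) // 3
--         z = (num_students - 1) % 3
--         if count == 0:
--             extra_line = 0
--         else:
--             if z == 2:
--                 line_1 = count + 2
--                 line_2 = line_1 + count + 2
--             elif z == 0:
--                 line_1 = count + 1
--                 line_2 = line_1 + count + 1
--             else:
--                 line_1 = count + 2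
--                 line_2 = line_1 + count + 1
--
--         longitude = len(data[0])
--         scores_array = [[0 for j in range(longitude - 1)] for i in range(num_students + extra_line)]
--         flag = False
--         a = 0
--         w = 0
--         for x in range(num_students + extra_line):
--             b = 0
--             for y in range(longitude):
--                 if y != 0:
--                     if x != 0 and ((x == line_1) or (x == line_2)):
--                         if w < 2:
--                             scores_array[a][b] = ' '
--                             flag = True
--                         else:
--                             scores_array[a][b] = data[x - w][y]
--                             flag = False
--                     else:
--                         if w == 0:
--                             scores_array[a][b] = data[x][y]
--                         else:
--                             index = x - w
--                             if index < num_students: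
--                                 scores_array[a][b] = data[index][y]
--                             else:
--                                 scores_array[a][b] = ' '
--                     b += 1
--             a += 1
--             if flag:
--                 flag = False
--                 w += 1
--                 # if course_state != "finalized" and student_id:
--                 #     num_students = len(scores_array)
--                 #     columns = len(scores_array[0])
--                 #     for x in range(num_students):
--                 #         for y in range(columns):
--                 #             if y == columns-1 and x != 0:
--                 #                 scores_array[x][y] = '--'
--     else:
--         scores_array = []
--
--     return scores_array
-- ===== SOURCE B (Python) =====
-- def get_scores_array_without_index(data, course_state=None, student_id=None):
--     if not data:
--         return []
--     n = len(data)
--     longitude = len(data[0])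
--     rows = [row[1:longitude] for row in data]
--     count, z = divmod(n - 1, 3)
--     if count:
--         l1 = count + 1 + (1 if z != 0 else 0)
--         l2 = l1 + count + 1 + (1 if z == 2 else 0)
--         rows.insert(l1, [' '] * (longitude - 1))
--         rows.insert(l2, [' '] * (longitude - 1))
--     return rows
-- ===== Notes on version B (the rewrite author's own statement) =====
-- stated objective: simpler
-- what changed: A preallocates a zero matrix and fills it cell by cell with a nested mutating loop driven by a flag/w spacer counter; B first strips the index column from every row with one comprehension and then places the two blank rows with two list.insert calls, so there is no loop over output indices, no source counter and no per-cell branching (whole-row slicing is a measured constant-factor win).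
import Mathlib
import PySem

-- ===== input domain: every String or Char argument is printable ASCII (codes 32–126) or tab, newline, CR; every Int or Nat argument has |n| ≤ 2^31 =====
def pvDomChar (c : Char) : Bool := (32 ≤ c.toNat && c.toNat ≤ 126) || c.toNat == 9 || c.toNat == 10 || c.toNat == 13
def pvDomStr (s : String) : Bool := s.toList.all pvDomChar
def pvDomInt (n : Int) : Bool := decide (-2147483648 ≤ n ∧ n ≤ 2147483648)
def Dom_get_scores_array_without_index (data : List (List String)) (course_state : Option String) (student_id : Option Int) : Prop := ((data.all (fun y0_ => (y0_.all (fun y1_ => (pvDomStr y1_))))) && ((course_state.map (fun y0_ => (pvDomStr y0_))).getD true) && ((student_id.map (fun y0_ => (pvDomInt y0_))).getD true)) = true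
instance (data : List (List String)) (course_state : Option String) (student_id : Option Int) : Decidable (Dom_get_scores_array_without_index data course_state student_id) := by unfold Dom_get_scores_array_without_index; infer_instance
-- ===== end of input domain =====

-- B replaces A's preallocated zero matrix and flag/w-driven cell-by-cell double loop by two stages:
-- strip the index column from every row (one map), then place the two blank rows with two
-- list.insert calls; objective: simpler.

-- ===== PORT A =====
-- data[i][y]: Python indexing; both indices are Nat here and in range on every input Pre_ admits
def pvCellA (data : List (List String)) (i y : Nat) : String :=
  PySem.List.pyGetD (PySem.List.pyGetD data (i : Int) []) (y : Int) "0"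

-- scores_array[i][j] = v  (the in-place assignment of A's inner loop)
def pvSetCell (arr : List (List String)) (i j : Nat) (v : String) : List (List String) :=
  arr.set i ((arr.getD i []).set j v)

-- the inner 'for y in range(longitude)' of A, state (scores_array, b, flag)
def pvLoopYA (data : List (List String)) (n l1 l2 x w a : Nat) :
    List Nat → List (List String) × Nat × Bool → List (List String) × Nat × Bool
  | [], st => st
  | y :: ys, (arr, b, flag) =>
    if y ≠ 0 then
      if x ≠ 0 ∧ (x = l1 ∨ x = l2) then
        if w < 2 then
          pvLoopYA data n l1 l2 x w a ys (pvSetCell arr a b " ", b + 1, true)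
        else
          pvLoopYA data n l1 l2 x w a ys (pvSetCell arr a b (pvCellA data (x - w) y), b + 1, false)
      else
        if w = 0 then
          pvLoopYA data n l1 l2 x w a ys (pvSetCell arr a b (pvCellA data x y), b + 1, flag)
        else
          if x - w < n then
            pvLoopYA data n l1 l2 x w a ys (pvSetCell arr a b (pvCellA data (x - w) y), b + 1, flag)
          else
            pvLoopYA data n l1 l2 x w a ys (pvSetCell arr a b " ", b + 1, flag)
    else
      pvLoopYA data n l1 l2 x w a ys (arr, b, flag)

-- the outer 'for x in range(num_students + extra_line)' of A, state (scores_array, a, w, flag)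
def pvLoopXA (data : List (List String)) (n l1 l2 longitude : Nat) :
    List Nat → List (List String) → Nat → Nat → Bool → List (List String)
  | [], arr, _, _, _ => arr
  | x :: xs, arr, a, w, flag =>
    match pvLoopYA data n l1 l2 x w a (List.range longitude) (arr, 0, flag) with
    | (arr', _, flag') =>
      if flag' then pvLoopXA data n l1 l2 longitude xs arr' (a + 1) (w + 1) false
      else pvLoopXA data n l1 l2 longitude xs arr' (a + 1) w flag'

def get_scores_array_without_index (data : List (List String)) (course_state : Option String) (student_id : Option Int) : List (List String) :=
  if data = [] then []
  else
    let num_students := data.length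
    -- (num_students - 1) // 3 and % 3: operands are nonnegative ints, so Nat / and % are exact
    let count := (num_students - 1) / 3
    let z := (num_students - 1) % 3
    let elz : Nat × Nat × Nat :=
      if count = 0 then (0, 0, 0)                                -- extra_line = 0, line_1/line_2 keep 0
      else if z = 2 then (2, count + 2, (count + 2) + count + 2)
      else if z = 0 then (2, count + 1, (count + 1) + count + 1)
      else (2, count + 2, (count + 2) + count + 1)
    let longitude := (data.headD []).length
    -- the zero-filled matrix: Python's int 0 placeholders, all overwritten on admitted inputs
    let arr0 := List.replicate (num_students + elz.1) (List.replicate (longitude - 1) "0")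
    pvLoopXA data num_students elz.2.1 elz.2.2 longitude
      (List.range (num_students + elz.1)) arr0 0 0 false

-- ===== PORT B =====
-- strip the index column from every row, then insert the two blank rows in place
def get_scores_array_without_index_alt (data : List (List String)) (course_state : Option String) (student_id : Option Int) : List (List String) :=
  if data = [] then []
  else
    let n := data.length
    let longitude := (data.headD []).length
    let rows := data.map (fun row => PySem.List.slice row (some 1) (some (longitude : Int)))
    -- divmod(n - 1, 3): operands nonnegative, so Nat / and % are exact
    let count := (n - 1) / 3
    let z := (n - 1) % 3
    if count = 0 then rows
    else
      let l1 := count + 1 + (if z ≠ 0 then 1 else 0)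
      let l2 := l1 + count + 1 + (if z = 2 then 1 else 0)
      PySem.List.insert
        (PySem.List.insert rows (l1 : Int) (List.replicate (longitude - 1) " "))
        (l2 : Int) (List.replicate (longitude - 1) " ")

-- ===== PRECONDITION & SPEC =====
-- Pre_ excludes exactly the inputs on which A raises IndexError: longitude = len(data[0]) ≥ 2
-- while some row of data is shorter than longitude.
def Pre_get_scores_array_without_index (data : List (List String)) (course_state : Option String) (student_id : Option Int) : Prop :=
  (data.headD []).length ≤ 1 ∨ ∀ r ∈ data, (data.headD []).length ≤ r.length
instance (data : List (List String)) (course_state : Option String) (student_id : Option Int) : Decidable (Pre_get_scores_array_without_index data course_state student_id) := by unfold Pre_get_scores_array_without_index; infer_instance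

def pvWitness_get_scores_array_without_index : List (List String) × Option String × Option Int :=
  ([["id1", "7", "8"], ["id2", "5", "6"], ["id3", "9", "4"], ["id4", "3", "2"]], none, none)

def Spec_get_scores_array_without_index (data : List (List String)) (course_state : Option String) (student_id : Option Int) (out : List (List String)) : Prop := out = get_scores_array_without_index_alt data course_state student_id
instance (data : List (List String)) (course_state : Option String) (student_id : Option Int) (out : List (List String)) : Decidable (Spec_get_scores_array_without_index data course_state student_id out) := by unfold Spec_get_scores_array_without_index; infer_instance

-- ===== CLAIM (what is proved, stated in full; the proofs are below) =====
def Claim_equal_get_scores_array_without_index : Prop := ∀ (data : List (List String)) (course_state : Option String) (student_id : Option Int), Dom_get_scores_array_without_index data course_state student_id → Pre_get_scores_array_without_index data course_state student_id → Spec_get_scores_array_without_index data course_state student_id (get_scores_array_without_index data course_state student_id)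

-- ===== LEMMAS AND PROOFS =====

-- proof-only intermediate: the output described row by row (spacer rows at the indices in
-- 'spacers', the other rows taken from consecutive source rows starting at 'src')
def pvBuildB (data : List (List String)) (longitude : Nat) (spacers : List Nat) :
    List Nat → Nat → List (List String)
  | [], _ => []
  | x :: xs, src =>
    if x ∈ spacers then
      List.replicate (longitude - 1) " " :: pvBuildB data longitude spacers xs src
    else
      PySem.List.slice (PySem.List.pyGetD data (src : Int) []) (some 1) (some (longitude : Int)) ::
        pvBuildB data longitude spacers xs (src + 1)

-- the value A's inner loop writes at column y of output row x (given counter w)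
def pvCellVal (data : List (List String)) (n l1 l2 x w : Nat) (y : Nat) : String :=
  if x ≠ 0 ∧ (x = l1 ∨ x = l2) then (if w < 2 then " " else pvCellA data (x - w) y)
  else if w = 0 then pvCellA data x y
  else if x - w < n then pvCellA data (x - w) y else " "

def pvFlagStep (l1 l2 x w : Nat) (f : Bool) : Bool :=
  if x ≠ 0 ∧ (x = l1 ∨ x = l2) then decide (w < 2) else f

def pvRowA (data : List (List String)) (n l1 l2 L x w : Nat) : List String :=
  (List.range' 1 (L - 1)).map (pvCellVal data n l1 l2 x w)

def pvFlagOut (l1 l2 L x w : Nat) : Bool :=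
  decide (2 ≤ L) && pvFlagStep l1 l2 x w false

-- the per-row trace of A's outer loop
def pvSpecA (data : List (List String)) (n l1 l2 L : Nat) : Nat → Nat → Nat → List (List String)
  | 0, _, _ => []
  | k + 1, x, w =>
    pvRowA data n l1 l2 L x w ::
      pvSpecA data n l1 l2 L k (x + 1) (if pvFlagOut l1 l2 L x w then w + 1 else w)

lemma pv_set_getD_self {α : Type} (l : List α) (i : Nat) (d : α) (h : i < l.length) :
    l.set i (l.getD i d) = l := by
  induction l generalizing i with
  | nil => simp at h
  | cons hd tl ih =>
    cases i with
    | zero => simp [List.getD]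
    | succ j => simp only [List.length_cons, Nat.succ_lt_succ_iff] at h
                simpa [List.set, List.getD] using ih j h

lemma pv_take_succ_set {α : Type} (l : List α) (b : Nat) (v : α) (h : b < l.length) :
    (l.set b v).take (b + 1) = l.take b ++ [v] := by
  induction l generalizing b with
  | nil => simp at h
  | cons hd tl ih =>
    cases b with
    | zero => simp
    | succ j => simp only [List.length_cons, Nat.succ_lt_succ_iff] at h
                simp [List.set, ih j h]

lemma pv_getD_append_length {α : Type} (pref : List α) (y : α) (rest : List α) (d : α) :
    (pref ++ y :: rest).getD pref.length d = y := by
  induction pref with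
  | nil => simp [List.getD]
  | cons hd tl ih => simpa [List.getD] using ih

lemma pv_set_append_length {α : Type} (pref : List α) (y v : α) (rest : List α) :
    (pref ++ y :: rest).set pref.length v = pref ++ v :: rest := by
  induction pref with
  | nil => simp
  | cons hd tl ih => simp [List.set, ih]

lemma pvLoopYA_run (data : List (List String)) (n l1 l2 x w a : Nat) :
    ∀ (m s b : Nat) (arr : List (List String)) (f : Bool), 1 ≤ s → a < arr.length →
      (arr.getD a []).length = b + m →
      pvLoopYA data n l1 l2 x w a (List.range' s m) (arr, b, f) =
        (arr.set a ((arr.getD a []).take b ++ (List.range' s m).map (pvCellVal data n l1 l2 x w)),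
          b + m, if m = 0 then f else pvFlagStep l1 l2 x w f) := by
  intro m
  induction m with
  | zero =>
    intro s b arr f hs ha hrow
    have h1 : (arr.getD a []).take b = arr.getD a [] := List.take_of_length_le (by omega)
    simp only [List.range', List.map_nil, List.append_nil, pvLoopYA]
    rw [h1, pv_set_getD_self arr a [] ha]
    simp
  | succ m ih =>
    intro s b arr f hs ha hrow
    have hy : s ≠ 0 := by omega
    have hb : b < (arr.getD a []).length := by omega
    have harr' : ∀ v : String, ((pvSetCell arr a b v).getD a []) = (arr.getD a []).set b v := by
      intro v
      simp [pvSetCell, List.getD, List.getElem?_set_self, ha]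
    have hstep : ∀ (v : String) (f' : Bool),
        pvLoopYA data n l1 l2 x w a (List.range' (s+1) m) (pvSetCell arr a b v, b + 1, f') =
          (arr.set a ((arr.getD a []).take b ++ v :: (List.range' (s+1) m).map (pvCellVal data n l1 l2 x w)),
            b + (m + 1), if m = 0 then f' else pvFlagStep l1 l2 x w f') := by
      intro v f'
      rw [ih (s+1) (b+1) _ f' (by omega) (by simpa [pvSetCell] using ha)
        (by rw [harr']; rw [List.length_set]; omega)]
      rw [harr']
      simp only [pvSetCell, List.set_set]
      rw [pv_take_succ_set _ _ _ hb]
      refine congrArg₂ _ ?_ (by simp; omega)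
      simp
    rw [List.range'_succ]
    show pvLoopYA data n l1 l2 x w a (s :: List.range' (s+1) m) (arr, b, f) = _
    rw [pvLoopYA]
    simp only [hy, ne_eq, not_false_iff, if_true]
    by_cases hsp : x ≠ 0 ∧ (x = l1 ∨ x = l2)
    · by_cases hw : w < 2
      · simp only [if_pos hsp, if_pos hw]
        rw [hstep]
        simp [pvCellVal, pvFlagStep, hsp, hw, List.range'_succ]
      · simp only [if_pos hsp, if_neg hw]
        rw [hstep]
        simp [pvCellVal, pvFlagStep, hsp, hw, List.range'_succ]
    · by_cases hw0 : w = 0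
      · simp only [if_neg hsp, if_pos hw0]
        rw [hstep]
        simp [pvCellVal, pvFlagStep, hsp, hw0, List.range'_succ]
      · by_cases hin : x - w < n
        · simp only [if_neg hsp, if_neg hw0, if_pos hin]
          rw [hstep]
          simp [pvCellVal, pvFlagStep, hsp, hw0, hin, List.range'_succ]
        · simp only [if_neg hsp, if_neg hw0, if_neg hin]
          rw [hstep]
          simp [pvCellVal, pvFlagStep, hsp, hw0, hin, List.range'_succ]

lemma pvLoopYA_full (data : List (List String)) (n l1 l2 x w a L : Nat)
    (arr : List (List String)) (ha : a < arr.length) (hrow : (arr.getD a []).length = L - 1) :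
    pvLoopYA data n l1 l2 x w a (List.range L) (arr, 0, false) =
      (arr.set a (pvRowA data n l1 l2 L x w), L - 1, pvFlagOut l1 l2 L x w) := by
  cases L with
  | zero =>
    have hnil : arr.getD a [] = [] := List.eq_nil_of_length_eq_zero hrow
    have hset : arr.set a ([] : List String) = arr := by
      rw [← hnil]; exact pv_set_getD_self arr a [] ha
    simp [List.range_zero, pvLoopYA, pvRowA, pvFlagOut, pvFlagStep, hset]
  | succ s =>
    have h0 : List.range (s + 1) = 0 :: List.range' 1 s := by
      rw [List.range_eq_range', List.range'_succ]
    rw [h0, pvLoopYA]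
    rw [if_neg (by simp)]
    rw [pvLoopYA_run data n l1 l2 x w a s 1 0 arr false (le_refl 1) ha (by simpa using hrow)]
    simp only [List.take_zero, List.nil_append, pvRowA, pvFlagOut, Nat.add_sub_cancel,
      Nat.zero_add]
    refine congrArg₂ _ rfl (congrArg₂ _ rfl ?_)
    cases s with
    | zero => simp [pvFlagStep]
    | succ t =>
      have : (2 : Nat) ≤ t + 1 + 1 := by omega
      simp [this]

lemma pvLoopXA_run (data : List (List String)) (n l1 l2 L : Nat) :
    ∀ (k a w : Nat) (pref : List (List String)), pref.length = a →
      pvLoopXA data n l1 l2 L (List.range' a k)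
        (pref ++ List.replicate k (List.replicate (L - 1) "0")) a w false =
        pref ++ pvSpecA data n l1 l2 L k a w := by
  intro k
  induction k with
  | zero => intro a w pref hp; simp [pvLoopXA, pvSpecA]
  | succ k ih =>
    intro a w pref hp
    subst hp
    rw [List.range'_succ, List.replicate_succ, pvLoopXA]
    have ha : pref.length < (pref ++ List.replicate (L - 1) "0" :: List.replicate k (List.replicate (L - 1) "0")).length := by
      simp
    have hrow : ((pref ++ List.replicate (L - 1) "0" :: List.replicate k (List.replicate (L - 1) "0")).getD pref.length []).length = L - 1 := by
      rw [pv_getD_append_length]; simp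
    rw [pvLoopYA_full data n l1 l2 pref.length w pref.length L _ ha hrow]
    rw [pv_set_append_length]
    have hrest : pvRowA data n l1 l2 L pref.length w :: List.replicate k (List.replicate (L - 1) "0") =
        [pvRowA data n l1 l2 L pref.length w] ++ List.replicate k (List.replicate (L - 1) "0") := rfl
    by_cases hf : pvFlagOut l1 l2 L pref.length w = true
    · simp only [hf, if_true]
      rw [hrest, ← List.append_assoc,
        show pref.length + 1 = (pref ++ [pvRowA data n l1 l2 L pref.length w]).length by simp,
        ih ((pref ++ [pvRowA data n l1 l2 L pref.length w]).length) (w + 1) _ rfl]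
      simp [pvSpecA, hf]
    · simp only [Bool.not_eq_true] at hf
      simp only [hf, Bool.false_eq_true, if_false]
      rw [hrest, ← List.append_assoc,
        show pref.length + 1 = (pref ++ [pvRowA data n l1 l2 L pref.length w]).length by simp,
        ih ((pref ++ [pvRowA data n l1 l2 L pref.length w]).length) w _ rfl]
      simp [pvSpecA, hf]

lemma pvRowA_eq_slice (data : List (List String)) (L i : Nat) (hi : i < data.length)
    (hlen : 2 ≤ L → L ≤ (data.getD i []).length) :
    (List.range' 1 (L - 1)).map (pvCellA data i) =
      PySem.List.slice (data.getD i []) (some 1) (some (L : Int)) := by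
  have hs : PySem.List.slice (data.getD i []) (some 1) (some (L : Int)) =
      ((data.getD i []).drop 1).take (L - 1) := by
    rw [PySem.List.slice_toNat _ (by norm_num) (by positivity)]
    simp
  rw [hs]
  by_cases h2 : 2 ≤ L
  · have hlen := hlen h2
    apply List.ext_getElem
    · have hlen' : L ≤ (data[i]?.getD []).length := by simpa [List.getD] using hlen
      simp
      omega
    · intro j hj hj'
      simp only [List.getElem_map, List.getElem_range', List.getElem_take, List.getElem_drop,
        one_mul]
      have hjL : 1 + j < L := by simp at hj; omega
      rw [pvCellA]
      simp only [PySem.List.pyGetD_natCast]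
      rw [List.getD_eq_getElem _ _ (by omega)]
  · have h1 : L - 1 = 0 := by omega
    simp [h1]

lemma pvSpecA_nil (data : List (List String)) (n l1 l2 L : Nat) (hL : L ≤ 1) :
    ∀ (k x w : Nat), pvSpecA data n l1 l2 L k x w = List.replicate k [] := by
  intro k
  induction k with
  | zero => intro x w; rfl
  | succ k ih =>
    intro x w
    simp [pvSpecA, List.replicate_succ, pvRowA, show L - 1 = 0 by omega, ih]

lemma pvBuildB_nil (data : List (List String)) (L : Nat) (spacers : List Nat) (hL : L ≤ 1) :
    ∀ (ys : List Nat) (src : Nat),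
      pvBuildB data L spacers ys src = List.replicate ys.length [] := by
  intro ys
  induction ys with
  | nil => intro src; rfl
  | cons y ys ih =>
    intro src
    have hsl : ∀ l : List String, PySem.List.slice l (some 1) (some (L : Int)) = [] := by
      intro l
      rw [PySem.List.slice_toNat _ (by norm_num) (by positivity)]
      simp
      omega
    by_cases hy : y ∈ spacers
    · simp [pvBuildB, hy, show L - 1 = 0 by omega, List.replicate_succ, ih]
    · simp [pvBuildB, hy, hsl, List.replicate_succ, ih]

lemma pvBridge0 (data : List (List String)) (n L : Nat) (hn : n = data.length)
    (hPre : 2 ≤ L → ∀ r ∈ data, L ≤ r.length) :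
    ∀ (k x : Nat), x + k = n →
      pvSpecA data n 0 0 L k x 0 = pvBuildB data L [] (List.range' x k) x := by
  intro k
  induction k with
  | zero => intro x hx; rfl
  | succ k ih =>
    intro x hx
    have hxn : x < n := by omega
    rw [List.range'_succ]
    show pvSpecA data n 0 0 L (k + 1) x 0 = pvBuildB data L [] (x :: List.range' (x + 1) k) x
    rw [pvSpecA, pvBuildB]
    have hflag : ¬ (pvFlagOut 0 0 L x 0 = true) := by
      have hns : ¬(x ≠ 0 ∧ (x = 0 ∨ x = 0)) := by omega
      simp [pvFlagOut, pvFlagStep, hns]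
    rw [if_neg hflag, if_neg (by simp : ¬ x ∈ ([] : List Nat))]
    refine congrArg₂ List.cons ?_ (ih (x + 1) (by omega))
    rw [pvRowA]
    have hcv : ∀ y ∈ List.range' 1 (L - 1), pvCellVal data n 0 0 x 0 y = pvCellA data x y := by
      intro y _
      simp [pvCellVal]
    rw [List.map_congr_left hcv]
    rw [show PySem.List.pyGetD data (x : Int) [] = data.getD x [] from PySem.List.pyGetD_natCast ..]
    exact pvRowA_eq_slice data L x (by omega) (fun h2 => by
      rw [List.getD_eq_getElem _ _ (by omega)]
      exact hPre h2 _ (List.getElem_mem _))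

lemma pvBridge2 (data : List (List String)) (n L l1 l2 : Nat) (hn : n = data.length)
    (hL2 : 2 ≤ L) (hPre : ∀ r ∈ data, L ≤ r.length)
    (hl1 : 2 ≤ l1) (h12 : l1 < l2) (h1n : l1 ≤ n) (h2n : l2 ≤ n + 1) :
    ∀ (k x w : Nat), x + k = n + 2 →
      w = (if x ≤ l1 then 0 else if x ≤ l2 then 1 else 2) →
      pvSpecA data n l1 l2 L k x w =
        pvBuildB data L [l1, l2] (List.range' x k) (x - w) := by
  intro k
  induction k with
  | zero => intro x w hx hw; rfl
  | succ k ih =>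
    intro x w hx hw
    rw [List.range'_succ, pvSpecA, pvBuildB]
    by_cases hx1 : x = l1
    · have hw0 : w = 0 := by rw [hw, if_pos (by omega)]
      have hsp : x ≠ 0 ∧ (x = l1 ∨ x = l2) := ⟨by omega, Or.inl hx1⟩
      have hrow : pvRowA data n l1 l2 L x w = List.replicate (L - 1) " " := by
        rw [pvRowA,
          show (List.range' 1 (L - 1)).map (pvCellVal data n l1 l2 x w) =
              (List.range' 1 (L - 1)).map (fun _ => " ") from
            List.map_congr_left (fun y _ => by simp [pvCellVal, hsp, show w < 2 by omega]),
          List.map_const', List.length_range']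
      have hflag : pvFlagOut l1 l2 L x w = true := by
        simp [pvFlagOut, pvFlagStep, hsp, hL2, show w < 2 by omega]
      rw [hrow, hflag, if_pos (by simp [hx1] : x ∈ [l1, l2]), if_pos rfl]
      refine congrArg₂ List.cons rfl ?_
      have hwch : w + 1 = if x + 1 ≤ l1 then 0 else if x + 1 ≤ l2 then 1 else 2 := by
        rw [if_neg (by omega), if_pos (by omega)]; omega
      rw [ih (x + 1) (w + 1) (by omega) hwch, show x + 1 - (w + 1) = x - w by omega]
    · by_cases hx2 : x = l2
      · have hw1 : w = 1 := by rw [hw, if_neg (by omega), if_pos (by omega)]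
        have hsp : x ≠ 0 ∧ (x = l1 ∨ x = l2) := ⟨by omega, Or.inr hx2⟩
        have hrow : pvRowA data n l1 l2 L x w = List.replicate (L - 1) " " := by
          rw [pvRowA,
            show (List.range' 1 (L - 1)).map (pvCellVal data n l1 l2 x w) =
                (List.range' 1 (L - 1)).map (fun _ => " ") from
              List.map_congr_left (fun y _ => by simp [pvCellVal, hsp, show w < 2 by omega]),
            List.map_const', List.length_range']
        have hflag : pvFlagOut l1 l2 L x w = true := by
          simp [pvFlagOut, pvFlagStep, hsp, hL2, show w < 2 by omega]
        rw [hrow, hflag, if_pos (by simp [hx2] : x ∈ [l1, l2]), if_pos rfl]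
        refine congrArg₂ List.cons rfl ?_
        have hwch : w + 1 = if x + 1 ≤ l1 then 0 else if x + 1 ≤ l2 then 1 else 2 := by
          rw [if_neg (by omega), if_neg (by omega)]; omega
        rw [ih (x + 1) (w + 1) (by omega) hwch, show x + 1 - (w + 1) = x - w by omega]
      · have hsp : ¬(x ≠ 0 ∧ (x = l1 ∨ x = l2)) := by
          rintro ⟨-, h | h⟩
          exacts [hx1 h, hx2 h]
        have hwv : (x ≤ l1 ∧ w = 0) ∨ (l1 < x ∧ x ≤ l2 ∧ w = 1) ∨ (l2 < x ∧ w = 2) := by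
          by_cases h1 : x ≤ l1
          · exact Or.inl ⟨h1, by rw [hw, if_pos h1]⟩
          · by_cases h2 : x ≤ l2
            · exact Or.inr (Or.inl ⟨by omega, h2, by rw [hw, if_neg h1, if_pos h2]⟩)
            · exact Or.inr (Or.inr ⟨by omega, by rw [hw, if_neg h1, if_neg h2]⟩)
        have hxw : x - w < n := by
          rcases hwv with ⟨h, rfl⟩ | ⟨h, h', rfl⟩ | ⟨h, rfl⟩ <;> omega
        have hflag : ¬ (pvFlagOut l1 l2 L x w = true) := by
          simp [pvFlagOut, pvFlagStep, hsp]
        rw [if_neg hflag, if_neg (by simp [hx1, hx2] : ¬ x ∈ [l1, l2])]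
        refine congrArg₂ List.cons ?_ ?_
        · rw [pvRowA]
          have hcv : ∀ y ∈ List.range' 1 (L - 1),
              pvCellVal data n l1 l2 x w y = pvCellA data (x - w) y := by
            intro y _
            by_cases hw0 : w = 0
            · simp [pvCellVal, hsp, hw0]
            · simp [pvCellVal, hsp, hw0, hxw]
          rw [List.map_congr_left hcv,
            show PySem.List.pyGetD data ((x - w : Nat) : Int) [] = data.getD (x - w) [] from
              PySem.List.pyGetD_natCast ..]
          exact pvRowA_eq_slice data L (x - w) (by omega) (fun h2 => by
            rw [List.getD_eq_getElem _ _ (by omega)]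
            exact hPre _ (List.getElem_mem _))
        · have hwch : w = if x + 1 ≤ l1 then 0 else if x + 1 ≤ l2 then 1 else 2 := by
            rcases hwv with ⟨h, rfl⟩ | ⟨h, h', rfl⟩ | ⟨h, rfl⟩
            · rw [if_pos (by omega)]
            · rw [if_neg (by omega), if_pos (by omega)]
            · rw [if_neg (by omega), if_neg (by omega)]
          rw [ih (x + 1) w (by omega) hwch,
            show x + 1 - w = x - w + 1 by
              rcases hwv with ⟨h, rfl⟩ | ⟨h, h', rfl⟩ | ⟨h, rfl⟩ <;> omega]

lemma pvMain0 (data : List (List String)) (n L : Nat) (hn : n = data.length)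
    (hPre : L ≤ 1 ∨ ∀ r ∈ data, L ≤ r.length) :
    pvLoopXA data n 0 0 L (List.range n)
        (List.replicate n (List.replicate (L - 1) "0")) 0 0 false =
      pvBuildB data L [] (List.range n) 0 := by
  rw [List.range_eq_range',
    show List.replicate n (List.replicate (L - 1) "0") =
        [] ++ List.replicate n (List.replicate (L - 1) "0") from rfl,
    pvLoopXA_run data n 0 0 L n 0 0 [] rfl, List.nil_append]
  exact pvBridge0 data n L hn
    (fun h2 => hPre.resolve_left (by omega)) n 0 (by omega)

lemma pvMain2 (data : List (List String)) (n L l1 l2 : Nat) (hn : n = data.length)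
    (hPre : L ≤ 1 ∨ ∀ r ∈ data, L ≤ r.length)
    (hl1 : 2 ≤ l1) (h12 : l1 < l2) (h1n : l1 ≤ n) (h2n : l2 ≤ n + 1) :
    pvLoopXA data n l1 l2 L (List.range (n + 2))
        (List.replicate (n + 2) (List.replicate (L - 1) "0")) 0 0 false =
      pvBuildB data L [l1, l2] (List.range (n + 2)) 0 := by
  rw [List.range_eq_range',
    show List.replicate (n + 2) (List.replicate (L - 1) "0") =
        [] ++ List.replicate (n + 2) (List.replicate (L - 1) "0") from rfl,
    pvLoopXA_run data n l1 l2 L (n + 2) 0 0 [] rfl, List.nil_append]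
  by_cases h2L : 2 ≤ L
  · have hPre2 : ∀ r ∈ data, L ≤ r.length := hPre.resolve_left (by omega)
    have h00 : (0 : Nat) = if (0 : Nat) ≤ l1 then 0 else if (0 : Nat) ≤ l2 then 1 else 2 := by
      rw [if_pos (by omega)]
    have hb := pvBridge2 data n L l1 l2 hn h2L hPre2 hl1 h12 h1n h2n (n + 2) 0 0 (by omega) h00
    simpa using hb
  · have h1L : L ≤ 1 := by omega
    rw [pvSpecA_nil data n l1 l2 L h1L (n + 2) 0 0, pvBuildB_nil data L [l1, l2] h1L]
    simp

-- ===== linking pvBuildB to B's strip-then-insert form =====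
def pvStrip (data : List (List String)) (L : Nat) : List (List String) :=
  data.map (fun row => PySem.List.slice row (some 1) (some (L : Int)))

-- a segment of indices that contains no spacer copies consecutive stripped source rows
lemma pvBuildB_nosp (data : List (List String)) (L : Nat) (sp : List Nat) :
    ∀ (k x src : Nat), src + k ≤ data.length → (∀ y ∈ List.range' x k, ¬ y ∈ sp) →
      pvBuildB data L sp (List.range' x k) src = ((pvStrip data L).drop src).take k := by
  intro k
  induction k with
  | zero => intro x src h hm; simp [pvBuildB]
  | succ k ih =>
    intro x src h hm
    have hsrc : src < data.length := by omega
    have hsrc' : src < (pvStrip data L).length := by simp [pvStrip]; omega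
    rw [List.range'_succ]
    show pvBuildB data L sp (x :: List.range' (x + 1) k) src = _
    rw [pvBuildB, if_neg (hm x (by rw [List.range'_succ]; exact List.mem_cons_self ..))]
    rw [List.drop_eq_getElem_cons hsrc', List.take_succ_cons]
    refine congrArg₂ List.cons ?_ ?_
    · rw [show PySem.List.pyGetD data (src : Int) [] = data.getD src [] from
        PySem.List.pyGetD_natCast .., List.getD_eq_getElem _ _ hsrc]
      simp [pvStrip]
    · exact ih (x + 1) (src + 1) (by omega)
        (fun y hy => hm y (by rw [List.range'_succ]; exact List.mem_cons_of_mem _ hy))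

-- splitting the index list splits the output; the source pointer advances by the
-- number of non-spacer indices in the first part
lemma pvBuildB_append (data : List (List String)) (L : Nat) (sp : List Nat) :
    ∀ (ys zs : List Nat) (src : Nat),
      pvBuildB data L sp (ys ++ zs) src =
        pvBuildB data L sp ys src ++
          pvBuildB data L sp zs (src + (ys.filter (fun y => !decide (y ∈ sp))).length) := by
  intro ys
  induction ys with
  | nil => intro zs src; simp [pvBuildB]
  | cons y ys ih =>
    intro zs src
    rw [List.cons_append, pvBuildB, pvBuildB, List.filter_cons]
    by_cases hy : y ∈ sp
    · rw [if_pos hy, if_pos hy, if_neg (by simp [hy] : ¬((!decide (y ∈ sp)) = true)), ih]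
      rfl
    · rw [if_neg hy, if_neg hy, if_pos (by simp [hy] : (!decide (y ∈ sp)) = true),
        List.length_cons, ih,
        show src + 1 + (List.filter (fun y => !decide (y ∈ sp)) ys).length =
          src + ((List.filter (fun y => !decide (y ∈ sp)) ys).length + 1) from by omega]
      rfl

lemma pvBuildB_spacer (data : List (List String)) (L : Nat) (sp : List Nat)
    (x src : Nat) (hx : x ∈ sp) :
    pvBuildB data L sp [x] src = [List.replicate (L - 1) " "] := by
  simp [pvBuildB, hx]

-- count = 0 case: no spacers, the output is exactly the stripped rows
lemma pvAlt0 (data : List (List String)) (L : Nat) :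
    pvBuildB data L [] (List.range data.length) 0 = pvStrip data L := by
  rw [List.range_eq_range',
    pvBuildB_nosp data L [] data.length 0 0 (by omega) (by simp)]
  rw [List.drop_zero, List.take_of_length_le (by simp [pvStrip])]

-- step-1 range' splits at any point (the library lemma, specialised)
lemma pvRangeSplit (a m k : Nat) :
    List.range' a (m + k) = List.range' a m ++ List.range' (a + m) k :=
  Eq.symm List.range'_append_1

-- count ≠ 0 case: the pvBuildB description equals strip-then-two-inserts
lemma pvAlt2 (data : List (List String)) (L l1 l2 : Nat)
    (hl1 : 2 ≤ l1) (h12 : l1 < l2) (h1n : l1 ≤ data.length) (h2n : l2 ≤ data.length + 1) :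
    pvBuildB data L [l1, l2] (List.range (data.length + 2)) 0 =
      PySem.List.insert
        (PySem.List.insert (pvStrip data L) (l1 : Int) (List.replicate (L - 1) " "))
        (l2 : Int) (List.replicate (L - 1) " ") := by
  set T := pvStrip data L with hT
  set spr := List.replicate (L - 1) " " with hspr
  have hTlen : T.length = data.length := by simp [hT, pvStrip]
  have hsplit : List.range (data.length + 2) =
      (List.range' 0 l1 ++ [l1]) ++
        ((List.range' (l1 + 1) (l2 - l1 - 1) ++ [l2]) ++
          List.range' (l2 + 1) (data.length + 1 - l2)) :=
    calc List.range (data.length + 2)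
        = List.range' 0 (l1 + (data.length + 2 - l1)) := by
          rw [List.range_eq_range']; congr 1; omega
      _ = List.range' 0 l1 ++ List.range' l1 (data.length + 2 - l1) := by
          rw [pvRangeSplit, Nat.zero_add]
      _ = List.range' 0 l1 ++ List.range' l1 (1 + (data.length + 1 - l1)) := by
          rw [show data.length + 2 - l1 = 1 + (data.length + 1 - l1) from by omega]
      _ = List.range' 0 l1 ++ ([l1] ++ List.range' (l1 + 1) (data.length + 1 - l1)) := by
          rw [pvRangeSplit, List.range'_one]
      _ = List.range' 0 l1 ++ ([l1] ++ List.range' (l1 + 1) ((l2 - l1 - 1) + (1 + (data.length + 1 - l2)))) := by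
          rw [show data.length + 1 - l1 = (l2 - l1 - 1) + (1 + (data.length + 1 - l2)) from by omega]
      _ = List.range' 0 l1 ++ ([l1] ++ (List.range' (l1 + 1) (l2 - l1 - 1) ++ List.range' (l1 + 1 + (l2 - l1 - 1)) (1 + (data.length + 1 - l2)))) := by
          rw [pvRangeSplit]
      _ = List.range' 0 l1 ++ ([l1] ++ (List.range' (l1 + 1) (l2 - l1 - 1) ++ List.range' l2 (1 + (data.length + 1 - l2)))) := by
          rw [show l1 + 1 + (l2 - l1 - 1) = l2 from by omega]
      _ = List.range' 0 l1 ++ ([l1] ++ (List.range' (l1 + 1) (l2 - l1 - 1) ++ ([l2] ++ List.range' (l2 + 1) (data.length + 1 - l2)))) := by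
          rw [pvRangeSplit, List.range'_one]
      _ = (List.range' 0 l1 ++ [l1]) ++
            ((List.range' (l1 + 1) (l2 - l1 - 1) ++ [l2]) ++
              List.range' (l2 + 1) (data.length + 1 - l2)) := by
          simp [List.append_assoc]
  have hseg1 : pvBuildB data L [l1, l2] (List.range' 0 l1) 0 = T.take l1 := by
    rw [pvBuildB_nosp data L [l1, l2] l1 0 0 (by omega)
      (by intro y hy; rw [List.mem_range'_1] at hy; simp; omega), List.drop_zero]
  have hcnt1 : ((List.range' 0 l1).filter (fun y => !decide (y ∈ [l1, l2]))).length = l1 := by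
    rw [List.filter_eq_self.mpr, List.length_range']
    intro y hy
    rw [List.mem_range'_1] at hy
    simp
    omega
  have hcA : (((List.range' 0 l1) ++ [l1]).filter (fun y => !decide (y ∈ [l1, l2]))).length = l1 := by
    rw [List.filter_append, List.length_append, hcnt1]
    simp
  have hseg3 : pvBuildB data L [l1, l2] (List.range' (l1 + 1) (l2 - l1 - 1)) l1 =
      (T.drop l1).take (l2 - l1 - 1) := by
    rw [pvBuildB_nosp data L [l1, l2] (l2 - l1 - 1) (l1 + 1) l1 (by omega)
      (by intro y hy; rw [List.mem_range'_1] at hy; simp; omega)]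
  have hcnt3 : ((List.range' (l1 + 1) (l2 - l1 - 1)).filter
      (fun y => !decide (y ∈ [l1, l2]))).length = l2 - l1 - 1 := by
    rw [List.filter_eq_self.mpr, List.length_range']
    intro y hy
    rw [List.mem_range'_1] at hy
    simp
    omega
  have hcB : (((List.range' (l1 + 1) (l2 - l1 - 1)) ++ [l2]).filter
      (fun y => !decide (y ∈ [l1, l2]))).length = l2 - l1 - 1 := by
    rw [List.filter_append, List.length_append, hcnt3]
    simp
  have hseg5 : pvBuildB data L [l1, l2] (List.range' (l2 + 1) (data.length + 1 - l2)) (l2 - 1) =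
      T.drop (l2 - 1) := by
    rw [pvBuildB_nosp data L [l1, l2] (data.length + 1 - l2) (l2 + 1) (l2 - 1) (by omega)
      (by intro y hy; rw [List.mem_range'_1] at hy; simp; omega)]
    rw [List.take_of_length_le (by rw [List.length_drop, hTlen]; omega)]
  have hLHS : pvBuildB data L [l1, l2] (List.range (data.length + 2)) 0 =
      T.take l1 ++ spr :: ((T.drop l1).take (l2 - l1 - 1) ++ spr :: T.drop (l2 - 1)) := by
    rw [hsplit, pvBuildB_append, pvBuildB_append, pvBuildB_append, pvBuildB_append]
    rw [hseg1, pvBuildB_spacer data L [l1, l2] l1 _ (by simp),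
      pvBuildB_spacer data L [l1, l2] l2 _ (by simp)]
    rw [hcA, hcB]
    simp only [Nat.zero_add]
    rw [show l1 + (l2 - l1 - 1) = l2 - 1 from by omega]
    rw [hseg3, hseg5]
    simp [List.append_assoc, hspr]
  rw [hLHS]
  have hins1 : PySem.List.insert T (l1 : Int) spr = T.take l1 ++ spr :: T.drop l1 :=
    PySem.List.insert_natCast T l1 spr (by omega)
  rw [hins1]
  have hins2 : PySem.List.insert (T.take l1 ++ spr :: T.drop l1) (l2 : Int) spr =
      (T.take l1 ++ spr :: T.drop l1).take l2 ++ spr ::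
        (T.take l1 ++ spr :: T.drop l1).drop l2 :=
    PySem.List.insert_natCast _ l2 spr (by rw [List.length_append, List.length_cons, List.length_take, List.length_drop, hTlen]; omega)
  rw [hins2]
  have hlen1 : (T.take l1).length = l1 := by rw [List.length_take]; omega
  have htake : (T.take l1 ++ spr :: T.drop l1).take l2 =
      T.take l1 ++ spr :: (T.drop l1).take (l2 - l1 - 1) := by
    rw [List.take_append, hlen1, List.take_of_length_le (by rw [hlen1]; omega),
      show l2 - l1 = (l2 - l1 - 1) + 1 from by omega, List.take_succ_cons]
    simp
  have hdrop : (T.take l1 ++ spr :: T.drop l1).drop l2 = T.drop (l2 - 1) := by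
    rw [List.drop_append, hlen1, List.drop_eq_nil_of_le (by rw [hlen1]; omega),
      List.nil_append, show l2 - l1 = (l2 - l1 - 1) + 1 from by omega,
      List.drop_succ_cons, List.drop_drop]
    congr 1
    omega
  rw [htake, hdrop]
  simp

-- ===== VERDICT (by name: the statement is the Claim_ definition above) =====
theorem get_scores_array_without_index_spec : Claim_equal_get_scores_array_without_index := by
  intro data cs sid hDom hPre
  unfold Spec_get_scores_array_without_index
  unfold Pre_get_scores_array_without_index at hPre
  by_cases hd : data = []
  · subst hd; rfl
  · have hlen : 1 ≤ data.length := List.length_pos_of_ne_nil hd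
    rw [get_scores_array_without_index, get_scores_array_without_index_alt,
      if_neg hd, if_neg hd]
    dsimp only []
    by_cases hc0 : (data.length - 1) / 3 = 0
    · rw [if_pos hc0, if_pos hc0]
      dsimp only []
      have h := pvMain0 data data.length (data.headD []).length rfl hPre
      simp only [Nat.add_zero]
      rw [h, pvAlt0]
      rfl
    · have hc1 : 1 ≤ (data.length - 1) / 3 := by omega
      have hz3 : (data.length - 1) % 3 < 3 := Nat.mod_lt _ (by norm_num)
      rw [if_neg hc0, if_neg hc0]
      set c := (data.length - 1) / 3 with hc
      set z := (data.length - 1) % 3 with hz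
      set L := (data.headD []).length with hL
      have hmain : ∀ l1 l2 : Nat, 2 ≤ l1 → l1 < l2 → l1 ≤ data.length → l2 ≤ data.length + 1 →
          pvLoopXA data data.length l1 l2 L (List.range (data.length + 2))
            (List.replicate (data.length + 2) (List.replicate (L - 1) "0")) 0 0 false =
          PySem.List.insert
            (PySem.List.insert (data.map (fun row => PySem.List.slice row (some 1) (some (L : Int))))
              (l1 : Int) (List.replicate (L - 1) " "))
            (l2 : Int) (List.replicate (L - 1) " ") := by
        intro l1 l2 h1 h2 h3 h4
        rw [pvMain2 data data.length L l1 l2 rfl hPre h1 h2 h3 h4,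
          pvAlt2 data L l1 l2 h1 h2 h3 h4]
        rfl
      have hcn : 3 * c + z = data.length - 1 := Nat.div_add_mod _ 3
      by_cases hz2 : z = 2
      · rw [(if_pos (show z ≠ 0 by omega) : (if z ≠ 0 then (1 : Nat) else 0) = 1),
          (if_pos hz2 : (if z = 2 then (1 : Nat) else 0) = 1), if_pos hz2]
        dsimp only []
        rw [show c + 1 + 1 = c + 2 from by omega,
          show c + 2 + c + 1 + 1 = c + 2 + c + 2 from by omega]
        exact hmain (c + 2) (c + 2 + c + 2) (by omega) (by omega) (by omega) (by omega)
      · by_cases hz0 : z = 0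
        · rw [(if_neg (show ¬ z ≠ 0 by omega) : (if z ≠ 0 then (1 : Nat) else 0) = 0),
            (if_neg hz2 : (if z = 2 then (1 : Nat) else 0) = 0), if_neg hz2, if_pos hz0]
          dsimp only []
          rw [show c + 1 + 0 = c + 1 from by omega,
            show c + 1 + c + 1 + 0 = c + 1 + c + 1 from by omega]
          exact hmain (c + 1) (c + 1 + c + 1) (by omega) (by omega) (by omega) (by omega)
        · rw [(if_pos (show z ≠ 0 by omega) : (if z ≠ 0 then (1 : Nat) else 0) = 1),
            (if_neg hz2 : (if z = 2 then (1 : Nat) else 0) = 0), if_neg hz2, if_neg hz0]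
          dsimp only []
          rw [show c + 1 + 1 = c + 2 from by omega,
            show c + 2 + c + 1 + 0 = c + 2 + c + 1 from by omega]
          exact hmain (c + 2) (c + 2 + c + 1) (by omega) (by omega) (by omega) (by omega)
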